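-- pv_equiv track=rewrite | github.com/BlackRoad-OS-Inc/blackroad-os-core | seed_ultimate_unified_cipher.py | godel_number
-- ===== SOURCE A (Python) =====
-- def godel_number(text: str) -> int:
--     """
--     Gödel numbering: Encode text as unique integer
--
--     GEB concept: Self-referential systems
--     For crypto: Text → number → manipulate → back to text (strange loop!)
--     """
--     # Simple Gödel numbering: map each character to prime powers
--     primes = [2, 3, 5, 7, 11, 13, 17, 19, 23, 29, 31, 37, 41, 43, 47, 53,
--               59, 61, 67, 71, 73, 79, 83, 89, 97, 101]
--
--     godel_num = 1
--     for i, char in enumerate(text[:20]):  # Limit to prevent overflow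
--         if char.isalpha():
--             idx = ord(char.lower()) - ord('a')
--             if idx < len(primes):
--                 godel_num *= primes[idx] ** (i + 1)
--
--     return godel_num % (2**256)  # Keep within reasonable range
-- ===== SOURCE B (Python) =====
-- def godel_number(text: str) -> int:
--     """Staged per-letter passes: for each of the 26 prime indices, sum the positional
--     exponents contributed by that letter across text[:20]; then one product, mod once."""
--     primes = [2, 3, 5, 7, 11, 13, 17, 19, 23, 29, 31, 37, 41, 43, 47, 53,
--               59, 61, 67, 71, 73, 79, 83, 89, 97, 101]
--     s = text[:20]
--     total = 1
--     for idx in range(26):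
--         e = sum(i + 1 for i, c in enumerate(s)
--                 if c.isalpha() and ord(c.lower()) - ord('a') == idx)
--         total *= primes[idx] ** e
--     return total % (2**256)
-- ===== Notes on version B (the rewrite author's own statement) =====
-- stated objective: alternative
-- what changed: Instead of A's single running product over positions, B loops over the 26 prime indices, computes for each one the summed positional exponent of that letter with an inner comprehension over the text, and multiplies the 26 prime powers once, taking the modulus only at the end.
import Mathlib
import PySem

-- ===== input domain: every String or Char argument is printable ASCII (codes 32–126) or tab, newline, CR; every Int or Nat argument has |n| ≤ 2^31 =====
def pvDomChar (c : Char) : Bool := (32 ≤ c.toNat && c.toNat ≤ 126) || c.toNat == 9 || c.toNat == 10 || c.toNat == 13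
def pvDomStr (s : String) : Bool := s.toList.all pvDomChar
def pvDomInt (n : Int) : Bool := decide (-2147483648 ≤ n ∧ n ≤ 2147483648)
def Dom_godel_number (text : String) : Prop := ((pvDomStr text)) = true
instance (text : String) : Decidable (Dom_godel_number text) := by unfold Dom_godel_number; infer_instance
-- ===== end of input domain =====

-- B replaces A's running product over positions by 26 staged passes: for each prime index it
-- sums that letter's positional exponents, then multiplies the 26 prime powers once at the end.


-- ===== PORT A =====
def pvPrimes : List Int :=
  [2, 3, 5, 7, 11, 13, 17, 19, 23, 29, 31, 37, 41, 43, 47, 53,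
   59, 61, 67, 71, 73, 79, 83, 89, 97, 101]

-- loop body of A: running product (exponent i+1 is a nonnegative Python int, ported via .toNat)
def pvGStep (acc : Int) (p : Int × Char) : Int :=
  if PySem.Str.isalpha p.2 then
    let idx : Int := ((PySem.Chars.lowerChar p.2).toNat : Int) - 97
    if idx < (pvPrimes.length : Int) then
      acc * (PySem.List.pyGetD pvPrimes idx 0) ^ (p.1 + 1).toNat
    else acc
  else acc

def godel_number (text : String) : Int :=
  let g : Int :=
    (PySem.List.enumerate (PySem.List.slice text.toList none (some 20)) 0).foldl pvGStep 1
  PySem.Int.mod g (2 ^ 256)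

-- ===== PORT B =====
-- B's inner comprehension: sum(i + 1 for i, c in enumerate(s) if c.isalpha() and ord(c.lower()) - ord('a') == idx)
def pvExpSum (s : List Char) (idx : Int) : Int :=
  (((PySem.List.enumerate s 0).filter
      (fun p => PySem.Str.isalpha p.2 && (((PySem.Chars.lowerChar p.2).toNat : Int) - 97 == idx))).map
    (fun p => p.1 + 1)).sum

def godel_number_alt (text : String) : Int :=
  let s := PySem.List.slice text.toList none (some 20)
  let total : Int :=
    (PySem.List.pyRange 0 26 1).foldl
      (fun total idx => total * (PySem.List.pyGetD pvPrimes idx 0) ^ (pvExpSum s idx).toNat) 1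
  PySem.Int.mod total (2 ^ 256)

-- ===== PRECONDITION & SPEC =====
def Spec_godel_number (text : String) (out : Int) : Prop := out = godel_number_alt text
instance (text : String) (out : Int) : Decidable (Spec_godel_number text out) := by unfold Spec_godel_number; infer_instance

-- ===== CLAIM (what is proved, stated in full; the proofs are below) =====
def Claim_equal_godel_number : Prop := ∀ (text : String), Dom_godel_number text → Spec_godel_number text (godel_number text)

-- ===== LEMMAS AND PROOFS =====

-- abbreviations used only by the proofs
def pvQ (j : Int) : Int := PySem.List.pyGetD pvPrimes j 0

def pvCond (p : Int × Char) (idx : Int) : Bool :=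
  PySem.Str.isalpha p.2 && (((PySem.Chars.lowerChar p.2).toNat : Int) - 97 == idx)

-- pvExpSum generalised to an arbitrary enumerated list
def pvE (l : List (Int × Char)) (idx : Int) : Int :=
  ((l.filter (fun p => pvCond p idx)).map (fun p => p.1 + 1)).sum

theorem pvExpSum_eq_pvE (s : List Char) (idx : Int) :
    pvExpSum s idx = pvE (PySem.List.enumerate s 0) idx := rfl

theorem pvE_nil (idx : Int) : pvE [] idx = 0 := rfl

theorem pvE_cons (p : Int × Char) (t : List (Int × Char)) (idx : Int) :
    pvE (p :: t) idx = (if pvCond p idx then p.1 + 1 else 0) + pvE t idx := by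
  simp only [pvE, List.filter_cons]
  split <;> simp

theorem pvE_nonneg (l : List (Int × Char)) (hpos : ∀ p ∈ l, 0 ≤ p.1) (idx : Int) :
    0 ≤ pvE l idx := by
  induction l with
  | nil => simp [pvE_nil]
  | cons p t ih =>
    rw [pvE_cons]
    have h1 : 0 ≤ p.1 := hpos p List.mem_cons_self
    have h2 := ih (fun q hq => hpos q (List.mem_cons_of_mem _ hq))
    split <;> omega

-- a fold whose step multiplies the accumulator factors out of the initial value
theorem pv_foldl_mul {α : Type} (f : α → Int) (l : List α) :
    ∀ a : Int, l.foldl (fun t x => t * f x) a = a * (l.map f).prod := by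
  induction l with
  | nil => intro a; simp
  | cons x t ih =>
    intro a
    simp only [List.foldl_cons, List.map_cons, List.prod_cons]
    rw [ih (a * f x)]; ring

theorem pvGStep_hom : ∀ (a : Int) (p : Int × Char), pvGStep a p = a * pvGStep 1 p := by
  intro a p
  simp only [pvGStep]
  split_ifs <;> ring

theorem pv_foldl_gstep (l : List (Int × Char)) :
    ∀ a : Int, l.foldl pvGStep a = a * l.foldl pvGStep 1 := by
  induction l with
  | nil => intro a; simp
  | cons x t ih =>
    intro a
    simp only [List.foldl_cons]
    rw [ih (pvGStep a x), ih (pvGStep 1 x), pvGStep_hom a x, mul_assoc]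

theorem pv_list_prod_range (f : Nat → Int) (n : Nat) :
    ((List.range n).map f).prod = ∏ i ∈ Finset.range n, f i := by
  induction n with
  | zero => simp
  | succ m ih => rw [List.range_succ, Finset.prod_range_succ, List.map_append, List.prod_append]; simp [ih]

theorem pv_alpha_bounds (c : Char) (h : PySem.Chars.isalpha c = true) :
    97 ≤ (PySem.Chars.lowerChar c).toNat ∧ (PySem.Chars.lowerChar c).toNat ≤ 122 := by
  simp only [PySem.Chars.isalpha, PySem.Chars.isupper, PySem.Chars.islower, Bool.or_eq_true,
    Bool.and_eq_true, decide_eq_true_eq, Char.le_def] at h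
  unfold PySem.Chars.lowerChar PySem.Chars.isupper
  rcases h with ⟨h1, h2⟩ | ⟨h1, h2⟩
  · simp only [Char.le_def, h1, h2, decide_true, Bool.and_self, if_pos]
    have hn : 65 ≤ c.toNat ∧ c.toNat ≤ 90 := ⟨h1, h2⟩
    have hv : (c.toNat + 32).isValidChar := Or.inl (by omega)
    rw [Char.toNat_ofNat, if_pos hv]
    omega
  · have hn : 97 ≤ c.toNat ∧ c.toNat ≤ 122 := ⟨h1, h2⟩
    split
    · next hcond =>
      exfalso
      simp only [Bool.and_eq_true, decide_eq_true_eq, Char.le_def] at hcond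
      have : c.toNat ≤ 90 := hcond.2
      omega
    · exact hn

-- the heart: A's running product equals the product over the 26 prime indices of the
-- prime raised to the summed exponents pvE collects
theorem pv_main (l : List (Int × Char)) (hpos : ∀ p ∈ l, 0 ≤ p.1) :
    l.foldl pvGStep 1 = ∏ n ∈ Finset.range 26, pvQ (n : Int) ^ (pvE l (n : Int)).toNat := by
  induction l with
  | nil => simp [pvE_nil]
  | cons p t ih =>
    have hp0 : 0 ≤ p.1 := hpos p List.mem_cons_self
    have hpost : ∀ q ∈ t, 0 ≤ q.1 := fun q hq => hpos q (List.mem_cons_of_mem _ hq)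
    have ht := ih hpost
    simp only [List.foldl_cons]
    rw [pv_foldl_gstep, ht]
    have hsplit : ∀ n : Nat, n ∈ Finset.range 26 →
        pvQ (n : Int) ^ (pvE (p :: t) (n : Int)).toNat
          = pvQ (n : Int) ^ (if pvCond p (n : Int) then p.1 + 1 else 0).toNat
              * pvQ (n : Int) ^ (pvE t (n : Int)).toNat := by
      intro n _
      rw [pvE_cons, Int.toNat_add (by split <;> omega) (pvE_nonneg t hpost _), pow_add]
    rw [Finset.prod_congr rfl hsplit, Finset.prod_mul_distrib]
    congr 1
    by_cases ha : PySem.Str.isalpha p.2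
    · have hb := pv_alpha_bounds p.2 ha
      set idx0 : Int := ((PySem.Chars.lowerChar p.2).toNat : Int) - 97 with hidx0
      have hrange : 0 ≤ idx0 ∧ idx0 < 26 := by omega
      have hmem : idx0.toNat ∈ Finset.range 26 := by
        simp only [Finset.mem_range]; omega
      have hcast : ((idx0.toNat : Nat) : Int) = idx0 := Int.toNat_of_nonneg hrange.1
      have hcond : ∀ n : Nat, pvCond p (n : Int) = decide (n = idx0.toNat) := by
        intro n
        simp only [pvCond, ha, Bool.true_and]
        by_cases hn : n = idx0.toNat
        · subst hn; simp only [hcast, decide_true, beq_iff_eq]; exact hidx0.symm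
        · simp only [hn, decide_false, beq_eq_false_iff_ne, ne_eq]
          intro hcontra
          exact hn (by omega)
      have hGp : pvGStep 1 p = pvQ idx0 ^ (p.1 + 1).toNat := by
        simp only [pvGStep, ha, if_pos, pvQ, one_mul, ← hidx0]
        rw [if_pos (by simp [pvPrimes]; omega)]
      calc pvGStep 1 p = if idx0.toNat ∈ Finset.range 26 then
              pvQ ((idx0.toNat : Nat) : Int) ^ (p.1 + 1).toNat else 1 := by
            rw [if_pos hmem, hcast, hGp]
        _ = ∏ n ∈ Finset.range 26,
              (if n = idx0.toNat then pvQ (n : Int) ^ (p.1 + 1).toNat else 1) := by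
            rw [Finset.prod_ite_eq' (Finset.range 26) idx0.toNat
              (fun n => pvQ (n : Int) ^ (p.1 + 1).toNat)]
        _ = ∏ n ∈ Finset.range 26,
              pvQ (n : Int) ^ (if pvCond p (n : Int) then p.1 + 1 else 0).toNat := by
            refine Finset.prod_congr rfl (fun n _ => ?_)
            rw [hcond n]
            by_cases hn : n = idx0.toNat <;> simp [hn]
    · have hG1 : pvGStep 1 p = 1 := by simp [pvGStep, ha]
      have hc : ∀ n : Nat, pvCond p (n : Int) = false := by
        intro n; simp [pvCond, ha]
      have hone : ∀ n ∈ Finset.range 26,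
          pvQ (n : Int) ^ (if pvCond p (n : Int) then p.1 + 1 else 0).toNat = 1 := by
        intro n _; simp [hc n]
      rw [hG1, Finset.prod_congr rfl hone, Finset.prod_const_one]

-- ===== VERDICT (by name: the statement is the Claim_ definition above) =====
theorem godel_number_spec : Claim_equal_godel_number := by
  intro text _
  unfold Spec_godel_number godel_number godel_number_alt
  show PySem.Int.mod
      ((PySem.List.enumerate (PySem.List.slice text.toList none (some 20)) 0).foldl pvGStep 1)
      (2 ^ 256)
    = PySem.Int.mod
      ((PySem.List.pyRange 0 26 1).foldl
        (fun total idx => total * (PySem.List.pyGetD pvPrimes idx 0)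
          ^ (pvExpSum (PySem.List.slice text.toList none (some 20)) idx).toNat) 1)
      (2 ^ 256)
  have hpos : ∀ p ∈ PySem.List.enumerate (PySem.List.slice text.toList none (some 20)) 0,
      0 ≤ p.1 := by
    intro p hp
    obtain ⟨k, hk, hpeq⟩ := (PySem.List.mem_enumerate_iff _ _ _).mp hp
    rw [hpeq]; simp
  have hB : (PySem.List.pyRange 0 26 1).foldl
      (fun total idx => total * (PySem.List.pyGetD pvPrimes idx 0)
        ^ (pvExpSum (PySem.List.slice text.toList none (some 20)) idx).toNat) 1
      = ∏ n ∈ Finset.range 26,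
          pvQ (n : Int)
            ^ (pvE (PySem.List.enumerate (PySem.List.slice text.toList none (some 20)) 0)
                (n : Int)).toNat := by
    rw [pv_foldl_mul (fun idx => (PySem.List.pyGetD pvPrimes idx 0)
        ^ (pvExpSum (PySem.List.slice text.toList none (some 20)) idx).toNat),
      one_mul, PySem.List.pyRange_one, List.map_map, pv_list_prod_range]
    refine Finset.prod_congr rfl (fun n _ => ?_)
    simp [pvQ, pvExpSum_eq_pvE]
  rw [hB, pv_main _ hpos]
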